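-- pv_equiv track=rewrite | github.com/azarSWE/Instant-Runoff-Voting | main.py | get_votes_dict
-- ===== SOURCE A (Python) =====
-- def get_candidates_id(votes_list):
--     """
--     get_candidates_id - A function to determine the ID of candidates who are still in competition
--     :param votes_list: a list of lists containing votes for each candidate who is still in competition
--     :return: a list of candidates' ID
--     """
--     candidates_id = []
--     for i in range(len(votes_list)):
--         for j in range(len(votes_list[i])):
--             if votes_list[i][j] not in candidates_id:
--                 candidates_id.append(votes_list[i][j])
--     return candidates_id
--
-- def get_votes_dict(votes_list):
--     """
--     get_votes_dict - A function to convert a list of votes to a dictionary structure type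
--     :param votes_list: a list of votes
--     :return: votes_dict a dictionary, key: candidate' ID and value: the number of first place votes
--     """
--     candidates_id = get_candidates_id(votes_list)
--     votes_dict = {}
--     for i in range(len(candidates_id)):
--         votes_dict[candidates_id[i]] = 0
--         for j in range(len(votes_list)):
--             if votes_list[j][0] == candidates_id[i]:
--                 votes_dict[candidates_id[i]] += 1
--     return votes_dict
-- ===== SOURCE B (Python) =====
-- def get_votes_dict(votes_list):
--     """
--     Build the table in one pass (setdefault keeps first-discovery order over all
--     positions), then one pass tallying first-place votes.
--     """
--     votes_dict = {}
--     for ballot in votes_list: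
--         for c in ballot:
--             votes_dict.setdefault(c, 0)
--     for ballot in votes_list:
--         if ballot:
--             votes_dict[ballot[0]] += 1
--     return votes_dict
-- ===== Notes on version B (the rewrite author's own statement) =====
-- stated objective: simpler
-- what changed: Replaces A's per-candidate rescan of all ballots (plus the quadratic membership-list discovery pass) with one setdefault pass building the table in discovery order and one pass tallying ballot heads.
import Mathlib
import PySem

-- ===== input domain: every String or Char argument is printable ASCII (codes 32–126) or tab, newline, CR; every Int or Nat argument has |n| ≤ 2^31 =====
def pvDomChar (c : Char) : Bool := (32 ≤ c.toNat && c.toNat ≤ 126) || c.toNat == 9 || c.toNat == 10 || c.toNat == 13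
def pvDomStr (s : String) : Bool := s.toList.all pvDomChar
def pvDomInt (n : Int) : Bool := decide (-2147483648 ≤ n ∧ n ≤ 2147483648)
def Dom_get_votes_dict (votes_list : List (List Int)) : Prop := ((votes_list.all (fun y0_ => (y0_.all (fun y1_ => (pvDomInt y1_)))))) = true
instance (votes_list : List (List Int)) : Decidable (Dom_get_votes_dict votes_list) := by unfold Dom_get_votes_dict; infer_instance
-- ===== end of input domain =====

-- B replaces A's per-candidate rescan of all ballots with one setdefault pass
-- (table in discovery order) plus one tally pass over ballot heads.

-- ===== PORT A =====
-- helper of A: discovery-order list of all candidate ids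
def get_candidates_id (votes_list : List (List Int)) : List Int :=
  votes_list.foldl (fun acc row =>
    row.foldl (fun acc v => if v ∈ acc then acc else acc ++ [v]) acc) []

def get_votes_dict (votes_list : List (List Int)) : List (Int × Int) :=
  let candidates_id := get_candidates_id votes_list
  (candidates_id.foldl (fun d c =>
      votes_list.foldl (fun d row =>
        if PySem.List.pyGetD row 0 0 == c then d.modify c 0 (· + 1) else d)
        (d.insert c 0))
    PySem.Dict.empty).items

-- ===== PORT B =====
def get_votes_dict_alt (votes_list : List (List Int)) : List (Int × Int) :=
  let d := votes_list.foldl (fun d row =>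
      row.foldl (fun d c => d.setdefault c 0) d) PySem.Dict.empty
  (votes_list.foldl (fun d row =>
      match row with
      | [] => d
      | c :: _ => d.modify c 0 (· + 1)) d).items

-- ===== PRECONDITION & SPEC =====
-- A raises IndexError (votes_list[j][0]) as soon as any candidate exists and some
-- ballot is empty; Pre_ admits exactly the inputs where A returns: either every
-- ballot non-empty, or every ballot empty (then A returns {}).
def Pre_get_votes_dict (votes_list : List (List Int)) : Prop :=
  (∀ r ∈ votes_list, r ≠ []) ∨ (∀ r ∈ votes_list, r = [])
instance (votes_list : List (List Int)) : Decidable (Pre_get_votes_dict votes_list) := by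
  unfold Pre_get_votes_dict; infer_instance

def pvWitness_get_votes_dict : List (List Int) := [[1, 2], [2, 3], [1]]

def Spec_get_votes_dict (votes_list : List (List Int)) (out : List (Int × Int)) : Prop := out = get_votes_dict_alt votes_list
instance (votes_list : List (List Int)) (out : List (Int × Int)) : Decidable (Spec_get_votes_dict votes_list out) := by unfold Spec_get_votes_dict; infer_instance

-- ===== CLAIM (what is proved, stated in full; the proofs are below) =====
def Claim_equal_get_votes_dict : Prop := ∀ (votes_list : List (List Int)), Dom_get_votes_dict votes_list → Pre_get_votes_dict votes_list → Spec_get_votes_dict votes_list (get_votes_dict votes_list)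

-- ===== LEMMAS AND PROOFS =====
theorem row_fold_add (row : List Int) (s : PySem.Set Int) :
    row.foldl (fun acc v => if v ∈ acc then acc else acc ++ [v]) s = PySem.Set.update s row := by
  induction row generalizing s with
  | nil => rfl
  | cons x t ih => rw [List.foldl_cons, PySem.Set.update_cons, ← PySem.Set.add_eq_ite]; exact ih _

theorem foldl_update_flatten (l : List (List Int)) (s : PySem.Set Int) :
    l.foldl (fun s row => PySem.Set.update s row) s = PySem.Set.update s l.flatten := by
  induction l generalizing s with
  | nil => rfl
  | cons r t ih => rw [List.foldl_cons, List.flatten_cons, PySem.Set.update_append]; exact ih _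

theorem candidates_eq (l : List (List Int)) :
    get_candidates_id l = PySem.Set.ofList l.flatten := by
  unfold get_candidates_id
  simp only [row_fold_add]
  rw [foldl_update_flatten]
  exact PySem.Set.update_nil_left _

theorem innerA_getD (l : List (List Int)) (c : Int) (d : PySem.Dict Int Int) :
    (l.foldl (fun d row => if PySem.List.pyGetD row 0 0 == c then d.modify c 0 (· + 1) else d) d).getD c 0
      = d.getD c 0 + (l.countP (fun row => PySem.List.pyGetD row 0 0 == c) : Int) := by
  induction l generalizing d with
  | nil => simp
  | cons r t ih =>
    simp only [List.foldl_cons, List.countP_cons]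
    by_cases h : (PySem.List.pyGetD r 0 0 == c) = true
    · rw [if_pos h, ih, PySem.Dict.getD_modify_self]
      simp [h]; ring
    · rw [if_neg h, ih]
      simp [h]

theorem innerA_getD_ne (l : List (List Int)) (c c' : Int) (h : c' ≠ c) (d : PySem.Dict Int Int) :
    (l.foldl (fun d row => if PySem.List.pyGetD row 0 0 == c then d.modify c 0 (· + 1) else d) d).getD c' 0
      = d.getD c' 0 := by
  induction l generalizing d with
  | nil => rfl
  | cons r t ih =>
    simp only [List.foldl_cons]
    by_cases hc : (PySem.List.pyGetD r 0 0 == c) = true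
    · rw [if_pos hc, ih, PySem.Dict.getD_modify_of_ne _ _ _ h]
    · rw [if_neg hc, ih]

theorem innerA_keys (l : List (List Int)) (c : Int) (d : PySem.Dict Int Int)
    (h : d.contains c = true) :
    (l.foldl (fun d row => if PySem.List.pyGetD row 0 0 == c then d.modify c 0 (· + 1) else d) d).keys
      = d.keys := by
  induction l generalizing d with
  | nil => rfl
  | cons r t ih =>
    simp only [List.foldl_cons]
    by_cases hc : (PySem.List.pyGetD r 0 0 == c) = true
    · rw [if_pos hc, ih _ (by rw [PySem.Dict.contains_modify]; simp [h]),
        PySem.Dict.keys_modify, PySem.Dict.keys_insert_of_contains _ _ h]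
    · rw [if_neg hc, ih _ h]

theorem outerA_keys (cs : List Int) (l : List (List Int)) (d : PySem.Dict Int Int) :
    (cs.foldl (fun d c =>
        l.foldl (fun d row => if PySem.List.pyGetD row 0 0 == c then d.modify c 0 (· + 1) else d)
          (d.insert c 0)) d).keys
      = PySem.Set.update d.keys cs := by
  induction cs generalizing d with
  | nil => rfl
  | cons c t ih =>
    rw [List.foldl_cons, PySem.Set.update_cons, ih]
    congr 1
    rw [innerA_keys _ _ _ (PySem.Dict.contains_insert_self d c 0)]
    by_cases h : d.contains c = true
    · rw [PySem.Dict.keys_insert_of_contains _ _ h,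
        PySem.Set.add_of_mem ((PySem.Dict.contains_iff_mem_keys d c).mp h)]
    · rw [PySem.Dict.keys_insert_of_not_contains _ _ (by simpa using h),
        PySem.Set.add_of_not_mem (fun hm => h ((PySem.Dict.contains_iff_mem_keys d c).mpr hm))]

theorem outerA_getD_not_mem (cs : List Int) (l : List (List Int)) (c : Int) (h : c ∉ cs)
    (d : PySem.Dict Int Int) :
    (cs.foldl (fun d c =>
        l.foldl (fun d row => if PySem.List.pyGetD row 0 0 == c then d.modify c 0 (· + 1) else d)
          (d.insert c 0)) d).getD c 0
      = d.getD c 0 := by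
  induction cs generalizing d with
  | nil => rfl
  | cons c' t ih =>
    have hne : c ≠ c' := fun he => h (he ▸ List.mem_cons_self)
    rw [List.foldl_cons, ih (fun hm => h (List.mem_cons_of_mem _ hm)),
      innerA_getD_ne _ _ _ hne, PySem.Dict.getD_insert_of_ne _ _ _ hne]

theorem outerA_getD_mem (cs : List Int) (l : List (List Int)) (c : Int) (hnd : cs.Nodup)
    (hc : c ∈ cs) (d : PySem.Dict Int Int) :
    (cs.foldl (fun d c =>
        l.foldl (fun d row => if PySem.List.pyGetD row 0 0 == c then d.modify c 0 (· + 1) else d)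
          (d.insert c 0)) d).getD c 0
      = (l.countP (fun row => PySem.List.pyGetD row 0 0 == c) : Int) := by
  induction cs generalizing d with
  | nil => cases hc
  | cons c' t ih =>
    rw [List.foldl_cons]
    rcases List.mem_cons.mp hc with rfl | hmem
    · rw [outerA_getD_not_mem t l c ((List.nodup_cons.mp hnd).1) _,
        innerA_getD, PySem.Dict.getD_insert_self]
      ring
    · exact ih hnd.of_cons hmem _

theorem setdefault_fold_getD (row : List Int) (d : PySem.Dict Int Int) (c : Int) :
    (row.foldl (fun d c => d.setdefault c 0) d).getD c 0 = d.getD c 0 := by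
  induction row generalizing d with
  | nil => rfl
  | cons x t ih =>
    rw [List.foldl_cons, ih]
    by_cases h : c = x
    · subst h; rw [PySem.Dict.getD_setdefault_self]
    · rw [PySem.Dict.getD_eq_get?_getD, PySem.Dict.get?_setdefault_of_ne _ _ h,
        ← PySem.Dict.getD_eq_get?_getD]

theorem phase1_getD (l : List (List Int)) (d : PySem.Dict Int Int) (c : Int) :
    (l.foldl (fun d row => row.foldl (fun d c => d.setdefault c 0) d) d).getD c 0 = d.getD c 0 := by
  induction l generalizing d with
  | nil => rfl
  | cons r t ih => rw [List.foldl_cons, ih, setdefault_fold_getD]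

theorem setdefault_fold_keys (row : List Int) (d : PySem.Dict Int Int) :
    (row.foldl (fun d c => d.setdefault c 0) d).keys = PySem.Set.update d.keys row := by
  induction row generalizing d with
  | nil => rfl
  | cons x t ih =>
    rw [List.foldl_cons, ih, PySem.Set.update_cons]
    congr 1
    rw [PySem.Dict.keys_setdefault]
    by_cases h : d.contains x = true
    · rw [if_pos h, PySem.Set.add_of_mem ((PySem.Dict.contains_iff_mem_keys d x).mp h)]
    · rw [if_neg h, PySem.Set.add_of_not_mem (fun hm => h ((PySem.Dict.contains_iff_mem_keys d x).mpr hm))]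

theorem phase1_keys (l : List (List Int)) (d : PySem.Dict Int Int) :
    (l.foldl (fun d row => row.foldl (fun d c => d.setdefault c 0) d) d).keys
      = PySem.Set.update d.keys l.flatten := by
  induction l generalizing d with
  | nil => rfl
  | cons r t ih =>
    rw [List.foldl_cons, ih, setdefault_fold_keys, List.flatten_cons, PySem.Set.update_append]

theorem phase2_eq_map (l : List (List Int)) (h : ∀ r ∈ l, r ≠ []) (d : PySem.Dict Int Int) :
    l.foldl (fun d row =>
        match row with
        | [] => d
        | c :: _ => d.modify c 0 (· + 1)) d
      = (l.map (fun r => PySem.List.pyGetD r 0 0)).foldl (fun d x => d.modify x 0 (· + 1)) d := by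
  induction l generalizing d with
  | nil => rfl
  | cons r t ih =>
    cases r with
    | nil => exact absurd rfl (h _ List.mem_cons_self)
    | cons x rt =>
      rw [List.map_cons, List.foldl_cons, List.foldl_cons, PySem.List.pyGetD_zero_cons]
      exact ih (fun r hr => h r (List.mem_cons_of_mem _ hr)) _

theorem phase1_all_nil (l : List (List Int)) (h : ∀ r ∈ l, r = []) (d : PySem.Dict Int Int) :
    l.foldl (fun d row => row.foldl (fun d c => d.setdefault c 0) d) d = d := by
  induction l generalizing d with
  | nil => rfl
  | cons r t ih =>
    rw [List.foldl_cons, h r List.mem_cons_self]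
    exact ih (fun r hr => h r (List.mem_cons_of_mem _ hr)) _

theorem phase2_all_nil (l : List (List Int)) (h : ∀ r ∈ l, r = []) (d : PySem.Dict Int Int) :
    l.foldl (fun d row =>
        match row with
        | [] => d
        | c :: _ => d.modify c 0 (· + 1)) d = d := by
  induction l generalizing d with
  | nil => rfl
  | cons r t ih =>
    rw [List.foldl_cons, h r List.mem_cons_self]
    exact ih (fun r hr => h r (List.mem_cons_of_mem _ hr)) _

theorem count_heads (l : List (List Int)) (c : Int) :
    List.count c (l.map (fun r => PySem.List.pyGetD r 0 0))
      = l.countP (fun row => PySem.List.pyGetD row 0 0 == c) := by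
  rw [List.count_eq_countP, List.countP_map]
  rfl

theorem main_eq (l : List (List Int))
    (hpre : (∀ r ∈ l, r ≠ []) ∨ (∀ r ∈ l, r = [])) :
    get_votes_dict l = get_votes_dict_alt l := by
  rcases hpre with h | h
  · simp only [get_votes_dict, get_votes_dict_alt]
    have hset : get_candidates_id l = PySem.Set.ofList l.flatten := candidates_eq l
    have hnd : (get_candidates_id l).Nodup := by rw [hset]; exact PySem.Set.nodup_ofList _
    -- A side
    have hkeysA : (List.foldl (fun d c =>
        l.foldl (fun d row => if PySem.List.pyGetD row 0 0 == c then d.modify c 0 (· + 1) else d)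
          (d.insert c 0)) (PySem.Dict.empty : PySem.Dict Int Int) (get_candidates_id l)).keys = get_candidates_id l := by
      rw [outerA_keys, PySem.Dict.keys_empty, PySem.Set.update_nil_left,
        PySem.Set.ofList_eq_self_of_nodup _ hnd]
    -- B side dicts
    have hmemkeys : ∀ r ∈ l, PySem.List.pyGetD r 0 0 ∈
        (l.foldl (fun d row => row.foldl (fun d c => d.setdefault c 0) d) (PySem.Dict.empty : PySem.Dict Int Int)).keys := by
      intro r hr
      rw [phase1_keys, PySem.Dict.keys_empty, PySem.Set.update_nil_left, PySem.Set.mem_ofList]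
      cases r with
      | nil => exact absurd rfl (h _ hr)
      | cons x rt =>
        rw [PySem.List.pyGetD_zero_cons]
        exact List.mem_flatten.mpr ⟨x :: rt, hr, List.mem_cons_self⟩
    have hkeys1 : (l.foldl (fun d row => row.foldl (fun d c => d.setdefault c 0) d)
        (PySem.Dict.empty : PySem.Dict Int Int)).keys = get_candidates_id l := by
      rw [phase1_keys, PySem.Dict.keys_empty, PySem.Set.update_nil_left, hset]
    have hkeysB : (List.foldl (fun d row =>
        match row with
        | [] => d
        | c :: _ => d.modify c 0 (· + 1))
        (l.foldl (fun d row => row.foldl (fun d c => d.setdefault c 0) d) (PySem.Dict.empty : PySem.Dict Int Int)) l).keys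
        = get_candidates_id l := by
      rw [phase2_eq_map l h, PySem.Dict.keys_foldl_modify, PySem.Set.update_eq_append_filter]
      rw [List.filter_eq_nil_iff.mpr, List.append_nil, hkeys1]
      intro y hy
      have : y ∈ l.map (fun r => PySem.List.pyGetD r 0 0) := (PySem.Set.mem_ofList _ _).mp hy
      rcases List.mem_map.mp this with ⟨r, hr, rfl⟩
      simp only [Bool.not_eq_true', Bool.not_eq_false]
      exact (PySem.Set.contains_iff _ _).mpr (hmemkeys r hr)
    rw [PySem.Dict.items_eq_map_keys _ (by rw [hkeysA]; exact hnd) 0,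
        PySem.Dict.items_eq_map_keys _ (by rw [hkeysB]; exact hnd) 0, hkeysA, hkeysB]
    apply List.map_congr_left
    intro c hc
    rw [outerA_getD_mem _ _ _ hnd hc, phase2_eq_map l h, PySem.Dict.getD_foldl_modify_add_one,
      phase1_getD, PySem.Dict.getD_empty, count_heads]
    simp
  · have hfl : get_candidates_id l = [] := by
      rw [candidates_eq, List.flatten_eq_nil_iff.mpr (by intro r hr; exact h r hr)]
      rfl
    simp only [get_votes_dict, get_votes_dict_alt]
    rw [hfl, List.foldl_nil, phase1_all_nil l h, phase2_all_nil l h]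

-- ===== VERDICT (by name: the statement is the Claim_ definition above) =====
theorem get_votes_dict_spec : Claim_equal_get_votes_dict := by
  intro l _ hpre
  unfold Spec_get_votes_dict
  exact main_eq l hpre
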